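-- pv_equiv track=rewrite | github.com/Yurijgrim/Report | main.py | GetDataMapCountersElements
-- ===== SOURCE A (Python) =====
-- def GetDataMapCountersElements(datamap):
--     collect_datamap = [] # 3d-array [ [['Marta'],['Tom']], [['Marta'],['Bob']] ]
--
--     for page in datamap:
--         collect_datamap += page
--
--     result_dict = {}
--     for elem in collect_datamap:
--         if len(elem) == 0:
--             continue
--         elem = elem[0]
--         if elem not in result_dict:
--             result_dict[elem] = 0
--         result_dict[elem] += 1
--
--     out = []
--     for d in result_dict:
--         out.append([d,result_dict[d]])
--     return out
-- ===== SOURCE B (Python) =====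
-- def GetDataMapCountersElements(datamap):
--     # Partition-by-first-key: repeatedly take the leading key, strip all its
--     # occurrences from the remainder in one filter, and derive its count from
--     # the length drop. No dict, no counter, no seen-set.
--     firsts = [e[0] for page in datamap for e in page if e]
--     out = []
--     while firsts:
--         x = firsts[0]
--         rest = [y for y in firsts[1:] if y != x]
--         out.append([x, len(firsts) - len(rest)])
--         firsts = rest
--     return out
-- ===== Notes on version B (the rewrite author's own statement) =====
-- stated objective: alternative
-- what changed: Replaces A's single-pass hashed dict counter with a partition-by-leading-key loop: repeatedly filter out all occurrences of the current head from the remaining flat list and read the count off the length difference, so no dictionary or counter is maintained at all.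
import Mathlib
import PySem

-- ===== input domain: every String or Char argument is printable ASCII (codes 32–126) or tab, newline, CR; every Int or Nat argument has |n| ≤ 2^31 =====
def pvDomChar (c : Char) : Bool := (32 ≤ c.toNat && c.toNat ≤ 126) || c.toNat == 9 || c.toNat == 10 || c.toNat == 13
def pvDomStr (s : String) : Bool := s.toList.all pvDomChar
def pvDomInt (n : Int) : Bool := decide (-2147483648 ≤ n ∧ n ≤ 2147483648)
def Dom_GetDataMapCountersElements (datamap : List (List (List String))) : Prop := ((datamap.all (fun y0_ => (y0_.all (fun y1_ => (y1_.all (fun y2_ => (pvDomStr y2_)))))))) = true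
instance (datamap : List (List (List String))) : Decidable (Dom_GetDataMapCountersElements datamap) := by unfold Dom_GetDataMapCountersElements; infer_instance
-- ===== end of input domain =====

-- B replaces A's dict counter by a partition-by-leading-key loop (filter out the head key, count = length drop): an alternative decomposition, not faster.

-- ===== PORT A =====
-- one loop step of A's counting loop: skip empty elem, else take elem[0] and bump its dict entry
def pvStepA (rd : PySem.Dict String Int) (elem : List String) : PySem.Dict String Int :=
  if elem.length = 0 then rd
  else
    let e := elem.headD ""          -- elem[0]; elem is nonempty here
    let rd1 := if rd.contains e then rd else rd.insert e 0
    rd1.modify e 0 (· + 1)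

def GetDataMapCountersElements (datamap : List (List (List String))) : List (String × Int) :=
  let collect := datamap.foldl (fun acc page => acc ++ page) []
  let rd := collect.foldl pvStepA PySem.Dict.empty
  -- for d in result_dict: out.append([d, result_dict[d]]); every key of rd is present, so the lookup never raises
  rd.keys.map (fun k => (k, rd.getD k 0))

-- ===== PORT B =====
-- the while loop of B: firsts shrinks strictly (the head is removed), so recursion on the list
def pvGroup (firsts : List String) : List (String × Int) :=
  match firsts with
  | [] => []
  | x :: tl =>
    let rest := tl.filter (fun y => !(y == x))
    (x, ((x :: tl).length : Int) - (rest.length : Int)) :: pvGroup rest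
termination_by firsts.length
decreasing_by
  simp only [List.length_cons, List.length_unattach]
  exact Nat.lt_succ_of_le (le_trans (List.length_filter_le _ _) (by simp))

def GetDataMapCountersElements_alt (datamap : List (List (List String))) : List (String × Int) :=
  let firsts := datamap.flatMap (fun page => page.filterMap (fun e => e.head?))
  pvGroup firsts

-- ===== PRECONDITION & SPEC =====
def Spec_GetDataMapCountersElements (datamap : List (List (List String))) (out : List (String × Int)) : Prop := out = GetDataMapCountersElements_alt datamap
instance (datamap : List (List (List String))) (out : List (String × Int)) : Decidable (Spec_GetDataMapCountersElements datamap out) := by unfold Spec_GetDataMapCountersElements; infer_instance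

-- ===== CLAIM (what is proved, stated in full; the proofs are below) =====
def Claim_equal_GetDataMapCountersElements : Prop := ∀ (datamap : List (List (List String))), Dom_GetDataMapCountersElements datamap → Spec_GetDataMapCountersElements datamap (GetDataMapCountersElements datamap)

-- ===== LEMMAS AND PROOFS =====

-- A's "insert 0 if absent, then += 1" is exactly the counter step
theorem pvStepA_eq_counter (rd : PySem.Dict String Int) (e : String) :
    (if rd.contains e then rd else rd.insert e 0).modify e 0 (· + 1) = rd.modify e 0 (· + 1) := by
  by_cases h : rd.contains e = true
  · simp [h]
  · have h' : rd.contains e = false := by simpa using h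
    simp only [h', Bool.false_eq_true, if_false]
    have e1 : (rd.insert e 0).modify e 0 (· + 1) = (rd.insert e 0).insert e ((rd.insert e 0).getD e 0 + 1) :=
      PySem.Dict.ext_iff.mpr rfl
    have e2 : rd.modify e 0 (· + 1) = rd.insert e (rd.getD e 0 + 1) := PySem.Dict.ext_iff.mpr rfl
    rw [e1, e2, PySem.Dict.getD_insert_self, PySem.Dict.getD_of_not_contains rd 0 h',
      PySem.Dict.insert_insert_self]

-- A's counting loop over a page list equals the counter fold over the first elements
theorem pvFoldA_eq (l : List (List String)) (rd : PySem.Dict String Int) :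
    l.foldl pvStepA rd
      = (l.filterMap (fun e => e.head?)).foldl (fun d x => d.modify x 0 (· + 1)) rd := by
  induction l generalizing rd with
  | nil => rfl
  | cons elem rest ih =>
    cases elem with
    | nil => simpa [pvStepA] using ih rd
    | cons e es =>
      rw [List.filterMap_cons]
      simp only [List.head?_cons, List.foldl_cons]
      have : pvStepA rd (e :: es) = rd.modify e 0 (· + 1) := by
        simpa [pvStepA] using pvStepA_eq_counter rd e
      rw [this, ih]

-- ordered dedup commutes with filter
theorem pvOfList_filter (p : String → Bool) (l : List String) :
    (PySem.Set.ofList l).filter p = PySem.Set.ofList (l.filter p) := by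
  induction l with
  | nil => rfl
  | cons a l ih =>
    rw [PySem.Set.ofList_cons, PySem.Set.discard]
    by_cases h : p a = true
    · rw [List.filter_cons_of_pos h, List.filter_cons_of_pos h,
        List.filter_comm, ih, PySem.Set.ofList_cons, PySem.Set.discard]
    · have h' : p a = false := by simpa using h
      rw [List.filter_cons_of_neg (by simp [h']), List.filter_cons_of_neg (by simp [h']),
        List.filter_comm, ih]
      apply List.filter_eq_self.mpr
      intro y hy
      have hmem : y ∈ l.filter p := (PySem.Set.mem_ofList _ _).mp hy
      have hp : p y = true := (List.mem_filter.mp hmem).2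
      have : y ≠ a := by rintro rfl; rw [h'] at hp; exact Bool.false_ne_true hp
      simpa using this

-- peeling the leading key off an ordered dedup
theorem pvOfList_cons_filter (x : String) (l : List String) :
    PySem.Set.ofList (x :: l) = x :: PySem.Set.ofList (l.filter (fun y => !(y == x))) := by
  rw [PySem.Set.ofList_cons, PySem.Set.discard, pvOfList_filter]

-- B's partition loop computes exactly the ordered-dedup-with-counts table
theorem pvGroup_eq (l : List String) :
    pvGroup l = (PySem.Set.ofList l).map (fun k => (k, (l.count k : Int))) := by
  induction hn : l.length using Nat.strong_induction_on generalizing l with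
  | _ n ih =>
    match l with
    | [] => rw [pvGroup]; simp
    | x :: tl =>
      rw [pvGroup, pvOfList_cons_filter, List.map_cons]
      have hlen : (tl.filter (fun y => !(y == x))).length < n := by
        subst hn
        simpa using Nat.lt_succ_of_le (List.length_filter_le _ tl)
      rw [ih _ hlen _ rfl]
      congr 1
      · -- head: the length drop is the count of x
        have h2 : tl.length = (tl.filter (fun y => y == x)).length + (tl.filter (fun y => !(y == x))).length :=
          List.length_eq_length_filter_add _
        have h3 : (x :: tl).count x = tl.count x + 1 := by simp
        have h4 : tl.count x = (tl.filter (fun y => y == x)).length := by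
          rw [← List.countP_eq_length_filter]; rfl
        have hn' : tl.length + 1 = n := by simpa using hn
        simp only [Prod.mk.injEq, true_and]
        omega
      · -- tail: keys ≠ x keep their counts through the filter
        apply List.map_congr_left
        intro k hk
        have hkf : k ∈ tl.filter (fun y => !(y == x)) := (PySem.Set.mem_ofList _ _).mp hk
        have hne : ¬ (k == x) = true := by
          have := (List.mem_filter.mp hkf).2; simpa using this
        have hkx : k ≠ x := fun h => hne (by simp [h])
        have hc1 : (x :: tl).count k = tl.count k := by
          rw [List.count_cons]; simp [Ne.symm hkx]
        have hc2 : (tl.filter (fun y => !(y == x))).count k = tl.count k :=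
          List.count_filter (by simpa using hkx)
        rw [hc1, ← hc2]

-- ===== VERDICT (by name: the statement is the Claim_ definition above) =====
theorem GetDataMapCountersElements_spec : Claim_equal_GetDataMapCountersElements := by
  intro datamap _
  show GetDataMapCountersElements datamap = GetDataMapCountersElements_alt datamap
  unfold GetDataMapCountersElements GetDataMapCountersElements_alt
  simp only
  set firsts := datamap.flatMap (fun page => page.filterMap (fun e => e.head?)) with hf
  have hcollect : (datamap.foldl (fun acc page => acc ++ page) []).filterMap (fun e => e.head?) = firsts := by
    rw [show (datamap.foldl (fun acc page => acc ++ page) []) = datamap.flatMap id from by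
      simpa using PySem.List.foldl_append_eq_flatMap id datamap []]
    simp [hf, List.flatMap_def]
  have hA : (datamap.foldl (fun acc page => acc ++ page) []).foldl pvStepA PySem.Dict.empty
      = PySem.Dict.counter firsts := by
    rw [pvFoldA_eq, hcollect, PySem.Dict.counter_eq_foldl]
  rw [hA, pvGroup_eq, PySem.Dict.keys_counter]
  apply List.map_congr_left
  intro k _
  rw [PySem.Dict.getD_counter]
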